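-- pv_equiv track=rewrite | github.com/bkozlovsky/info_security | lab8/cipher.py | folding_hash
-- ===== SOURCE A (Python) =====
-- def folding_hash(data, address_size=5):
--     """
--     Implements folding method for hashing.
--
--     Args:
--         data (str or bytes): Data to hash
--         address_size (int): Size of the hash address in digits
--
--     Returns:
--         int: Hash value
--     """
--     if not data:
--         return 0
--
--     # Convert data to bytes
--     if isinstance(data, str):
--         data = data.encode('utf-8')
--
--     # Determine segment size based on address_size
--     segment_size = max(1, len(data) // 4)  # Divide into ~4 segments
--     max_value = 10 ** address_size - 1  # Maximum value with address_size digits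
--
--     # Process data in segments
--     hash_value = 0
--     for i in range(0, len(data), segment_size):
--         segment = data[i:i+segment_size]
--         # Sum the bytes in this segment
--         segment_value = sum(segment)
--         # Add to the hash value
--         hash_value = (hash_value + segment_value) % max_value
--
--     return hash_value
-- ===== SOURCE B (Python) =====
-- def folding_hash(data, address_size=5):
--     """Folding hash, computed as one flat byte-sum with a single final modulus."""
--     if not data:
--         return 0
--     if isinstance(data, str):
--         data = data.encode('utf-8')
--     return sum(data) % (10 ** address_size - 1)
-- ===== Notes on version B (the rewrite author's own statement) =====
-- stated objective: simpler
-- what changed: B deletes the segment_size computation and the whole segment loop with its per-step modulus, summing all bytes in one flat pass and applying a single final modulus, justified by associativity of modular addition.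
-- outside the precondition, e.g. on folding_hash('a', 0): A raises ZeroDivisionError, B raises ZeroDivisionError; on folding_hash('ab', -1): A returns -0.30000000000000526, B returns -0.3000000000000048
import Mathlib
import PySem

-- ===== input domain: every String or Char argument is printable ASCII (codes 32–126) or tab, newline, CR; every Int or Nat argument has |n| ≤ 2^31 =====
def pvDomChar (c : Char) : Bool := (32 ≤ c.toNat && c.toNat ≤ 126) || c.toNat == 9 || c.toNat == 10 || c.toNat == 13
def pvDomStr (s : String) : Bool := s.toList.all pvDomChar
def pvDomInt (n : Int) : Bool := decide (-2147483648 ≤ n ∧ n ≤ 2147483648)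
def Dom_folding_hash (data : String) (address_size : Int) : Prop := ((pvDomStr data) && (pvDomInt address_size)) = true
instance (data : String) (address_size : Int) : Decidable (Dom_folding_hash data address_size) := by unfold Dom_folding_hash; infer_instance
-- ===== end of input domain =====

-- B replaces A's segment loop with one flat byte sum and a single final modulus (objective: simpler).

-- ===== PORT A =====
-- data.encode('utf-8'): on Dom (ASCII only) each char encodes to the single byte c.toNat — exact there.
def folding_hash (data : String) (address_size : Int) : Int :=
  if data = "" then 0
  else
    let bytes : List Int := data.toList.map (fun c => (c.toNat : Int))
    let segment_size : Int := max 1 (PySem.Int.floordiv (bytes.length : Int) 4)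
    -- 10 ** address_size: exact for address_size ≥ 0 (Pre_ gives 1 ≤ address_size on this branch)
    let max_value : Int := 10 ^ address_size.toNat - 1
    (PySem.List.pyRange 0 (bytes.length : Int) segment_size).foldl
      (fun hash_value i =>
        PySem.Int.mod (hash_value + (PySem.List.slice bytes (some i) (some (i + segment_size))).sum) max_value)
      0

-- ===== PORT B =====
-- same single-byte-per-char encoding, exact on Dom (ASCII)
def folding_hash_alt (data : String) (address_size : Int) : Int :=
  if data = "" then 0
  else PySem.Int.mod (data.toList.map (fun c => (c.toNat : Int))).sum (10 ^ address_size.toNat - 1)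

-- ===== PRECONDITION & SPEC =====
-- Pre_ excludes nonempty data with address_size ≤ 0: there A raises ZeroDivisionError (address_size = 0)
-- or returns a float, not an int (address_size < 0, where 10 ** address_size is a float).
def Pre_folding_hash (data : String) (address_size : Int) : Prop :=
  data = "" ∨ 1 ≤ address_size
instance (data : String) (address_size : Int) : Decidable (Pre_folding_hash data address_size) := by
  unfold Pre_folding_hash; infer_instance

def pvWitness_folding_hash : String × Int := ("hello", 5)

def Spec_folding_hash (data : String) (address_size : Int) (out : Int) : Prop := out = folding_hash_alt data address_size
instance (data : String) (address_size : Int) (out : Int) : Decidable (Spec_folding_hash data address_size out) := by unfold Spec_folding_hash; infer_instance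

-- ===== CLAIM (what is proved, stated in full; the proofs are below) =====
def Claim_equal_folding_hash : Prop := ∀ (data : String) (address_size : Int), Dom_folding_hash data address_size → Pre_folding_hash data address_size → Spec_folding_hash data address_size (folding_hash data address_size)

-- ===== LEMMAS AND PROOFS =====

-- (h % m + x) % m = (h + x) % m for positive m
theorem pv_mod_add (a b m : Int) (hm : 0 < m) :
    PySem.Int.mod (PySem.Int.mod a m + b) m = PySem.Int.mod (a + b) m := by
  rw [PySem.Int.mod_eq_emod_of_pos hm, PySem.Int.mod_eq_emod_of_pos hm,
      PySem.Int.mod_eq_emod_of_pos hm]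
  rw [Int.add_emod (a % m) b, Int.emod_emod_of_dvd a dvd_rfl, ← Int.add_emod]

-- per-chunk fold with mod at each step = single mod of the total sum
theorem pv_chunkFold (s : Nat) (hs : 0 < s) (m : Int) (hm : 0 < m) :
    ∀ xs : List Int, ∀ acc : Int,
      (List.range ((xs.length + s - 1) / s)).foldl
        (fun h k => PySem.Int.mod (h + ((xs.drop (s * k)).take s).sum) m)
        (PySem.Int.mod acc m)
      = PySem.Int.mod (acc + xs.sum) m := by
  intro xs
  induction hn : xs.length using Nat.strong_induction_on generalizing xs with
  | _ n ih =>
    intro acc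
    rcases Nat.eq_zero_or_pos n with h0 | hpos
    · subst h0
      have hx : xs = [] := List.length_eq_zero_iff.mp hn
      subst hx
      have h1 : (s - 1) / s = 0 := Nat.div_eq_of_lt (by omega)
      simp [h1]
    · -- count = (n-1)/s + 1
      have hcount : (n + s - 1) / s = (n - 1) / s + 1 := by
        have h1 : n + s - 1 = (n - 1) + s := by omega
        rw [h1, Nat.add_div_right _ hs]
      rw [hcount, List.range_succ_eq_map, List.foldl_cons, List.foldl_map]
      have hstep : PySem.Int.mod (PySem.Int.mod acc m + ((xs.drop (s * 0)).take s).sum) m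
          = PySem.Int.mod (acc + (xs.take s).sum) m := by
        rw [Nat.mul_zero, List.drop_zero, pv_mod_add _ _ _ hm]
      rw [hstep]
      have hdrop : ∀ k : Nat, xs.drop (s * Nat.succ k) = (xs.drop s).drop (s * k) := by
        intro k
        rw [List.drop_drop]
        congr 1
        rw [Nat.mul_succ, Nat.add_comm]
      simp only [hdrop]
      have htail : ((xs.drop s).length + s - 1) / s = (n - 1) / s := by
        rw [List.length_drop, hn]
        rcases Nat.le_total s n with h | h
        · congr 1; omega
        · have hns : n - s = 0 := by omega
          rw [hns, Nat.div_eq_of_lt (by omega), Nat.div_eq_of_lt (by omega)]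
      have ihr := ih (xs.drop s).length (by rw [List.length_drop, hn]; omega) (xs.drop s) rfl
        (acc + (xs.take s).sum)
      rw [htail] at ihr
      rw [ihr]
      congr 1
      have := List.sum_take_add_sum_drop xs s
      omega

-- ===== VERDICT (by name: the statement is the Claim_ definition above) =====
theorem folding_hash_spec : Claim_equal_folding_hash := by
  intro data k hDom hPre
  unfold Spec_folding_hash folding_hash folding_hash_alt
  by_cases hd : data = ""
  · simp [hd]
  · have hk : 1 ≤ k := by
      rcases hPre with h | h
      · exact absurd h hd
      · exact h
    simp only [if_neg hd]
    set L : List Int := data.toList.map (fun c => (c.toNat : Int)) with hL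
    have hLne : L ≠ [] := by
      simp only [hL, ne_eq, List.map_eq_nil_iff, String.toList_eq_nil_iff]
      exact hd
    have hn : 0 < L.length := List.length_pos_iff.mpr hLne
    set n : Nat := L.length with hnd
    -- segment size as a natural number
    set sN : Nat := max 1 (n / 4) with hsN
    have hsPos : 0 < sN := by omega
    have hseg : max 1 (PySem.Int.floordiv (n : Int) 4) = (sN : Int) := by
      rw [PySem.Int.floordiv_eq_ediv_of_pos (by norm_num : (0:Int) < 4)]
      have : ((n : Int)) / 4 = ((n / 4 : Nat) : Int) := by push_cast; ring
      rw [this, hsN]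
      push_cast
      omega
    -- modulus is positive
    have hkt : 1 ≤ k.toNat := by omega
    have hm : (0:Int) < 10 ^ k.toNat - 1 := by
      have : (1:Int) < 10 ^ k.toNat := one_lt_pow₀ (by norm_num) (by omega)
      omega
    set m : Int := 10 ^ k.toNat - 1 with hmdef
    rw [hseg]
    rw [PySem.List.pyRange_of_pos 0 (n : Int) (by exact_mod_cast hsPos)]
    have hif : (0:Int) < (n:Int) := by exact_mod_cast hn
    rw [if_pos hif]
    have hcnt : (((n : Int) - 0 + (sN : Int) - 1) / (sN : Int)).toNat = (n + sN - 1) / sN := by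
      have h1 : ((n : Int) - 0 + (sN : Int) - 1) = ((n + sN - 1 : Nat) : Int) := by omega
      rw [h1]
      have h2 : (((n + sN - 1 : Nat) : Int)) / ((sN : Int)) = (((n + sN - 1) / sN : Nat) : Int) := by
        push_cast; ring
      rw [h2, Int.toNat_natCast]
    rw [hcnt, List.foldl_map]
    have hslice : ∀ j : Nat,
        PySem.List.slice L (some (0 + (sN : Int) * (j : Int))) (some (0 + (sN : Int) * (j : Int) + (sN : Int)))
          = (L.drop (sN * j)).take sN := by
      intro j
      have h1 : (0 + (sN : Int) * (j : Int)) = ((sN * j : Nat) : Int) := by push_cast; ring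
      rw [h1, PySem.List.slice_natCast_add]
    simp only [hslice]
    have hinit : (0:Int) = PySem.Int.mod 0 m := by
      rw [PySem.Int.mod_eq_emod_of_pos hm, Int.zero_emod]
    rw [hinit, pv_chunkFold sN hsPos m hm L 0]
    rw [zero_add]
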